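-- pv_equiv track=rewrite | github.com/Joseph21XD/Findoor-Backend | hello/views.py | deparsear
-- ===== SOURCE A (Python) =====
-- def deparsear(s):
--     dict_1= {"D":":", "S":"/","P":".","R":"_","G":"-","C":",","A":"&","V":"%","E":"=","I":"?","K":"@",
--          "U":"!","W":"#","B":"¡","F":"¿","H":"<","J":">","L":"[","M":"]","N":"(","O":")","Q":"\n",
--          "T":"\"","X":" ","Y":";", "Z":"$"}
--     lista= list(s)
--     resultado=""
--     est= True
--     for i in lista:
--         if(est==False):
--             resultado+=i.upper()
--             est= True
--         elif(i in dict_1):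
--             resultado+=dict_1[i]
--         elif(i.islower() or i.isdigit()):
--             resultado+=i
--         elif(i == "_"):
--             est= False
--     return resultado
-- ===== SOURCE B (Python) =====
-- def deparsear(s):
--     dict_1 = {"D":":", "S":"/","P":".","R":"_","G":"-","C":",","A":"&","V":"%","E":"=","I":"?","K":"@",
--          "U":"!","W":"#","B":"\u00a1","F":"\u00bf","H":"<","J":">","L":"[","M":"]","N":"(","O":")","Q":"\n",
--          "T":"\"","X":" ","Y":";", "Z":"$"}
--
--     def tr(seg):
--         return "".join(dict_1.get(c, c) for c in seg if c in dict_1 or c.islower() or c.isdigit())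
--
--     segs = s.split('_')
--     parts = [tr(segs[0])]
--     i = 1
--     while i < len(segs):
--         seg = segs[i]
--         if seg:
--             # the char right after '_' is uppercased raw, the rest translated
--             parts.append(seg[0].upper() + tr(seg[1:]))
--             i += 1
--         elif i == len(segs) - 1:
--             # trailing '_': escapes nothing
--             i += 1
--         else:
--             # '__' encoded a literal '_'; the following segment is ordinary
--             parts.append('_' + tr(segs[i + 1]))
--             i += 2
--     return "".join(parts)
-- ===== Notes on version B (the rewrite author's own statement) =====
-- stated objective: alternative
-- what changed: Replaced A's single-pass fold carrying a boolean escape flag by staged passes: split the string on '_', translate each segment with the table, and re-handle the escape at segment boundaries (uppercase each segment's first char; an empty segment encodes a literal '_', a trailing empty segment encodes nothing).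
import Mathlib
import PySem

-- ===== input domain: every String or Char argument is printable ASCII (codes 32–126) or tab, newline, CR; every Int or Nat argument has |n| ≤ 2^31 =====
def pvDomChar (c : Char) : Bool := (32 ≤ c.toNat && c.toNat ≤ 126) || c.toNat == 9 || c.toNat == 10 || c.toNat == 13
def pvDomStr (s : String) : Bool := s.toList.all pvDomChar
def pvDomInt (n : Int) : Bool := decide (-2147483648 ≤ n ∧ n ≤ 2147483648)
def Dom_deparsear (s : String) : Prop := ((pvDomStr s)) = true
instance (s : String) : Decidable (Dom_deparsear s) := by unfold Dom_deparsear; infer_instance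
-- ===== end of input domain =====

-- B replaces A's single-pass escape-flag machine by staged passes: split the string on '_',
-- then translate each segment and re-handle the escape at segment boundaries (objective: alternative decomposition).

-- ===== PORT A =====
-- the substitution table dict_1 (all keys and values are single characters, so Char × Char)
def pvDict1 : PySem.Dict Char Char := PySem.Dict.ofList
  [('D', ':'), ('S', '/'), ('P', '.'), ('R', '_'), ('G', '-'), ('C', ','), ('A', '&'),
   ('V', '%'), ('E', '='), ('I', '?'), ('K', '@'), ('U', '!'), ('W', '#'), ('B', '¡'),
   ('F', '¿'), ('H', '<'), ('J', '>'), ('L', '['), ('M', ']'), ('N', '('), ('O', ')'),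
   ('Q', '\n'), ('T', '"'), ('X', ' '), ('Y', ';'), ('Z', '$')]

-- one iteration of A's for-loop: state = (resultado, est)
def pvStepA (st : List Char × Bool) (c : Char) : List Char × Bool :=
  if st.2 = false then (st.1 ++ [PySem.Chars.upperChar c], true)
  else
    match PySem.Dict.get? pvDict1 c with
    | some v => (st.1 ++ [v], st.2)
    | none =>
      if PySem.Chars.islower c || PySem.Chars.isdigit c then (st.1 ++ [c], st.2)
      else if c = '_' then (st.1, false)
      else st

def deparsear (s : String) : String :=
  String.ofList (s.toList.foldl pvStepA ([], true)).1

-- ===== PORT B =====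
-- tr(seg): the comprehension "dict_1.get(c, c) for c in seg if c in dict_1 or c.islower() or c.isdigit()"
def pvTr (seg : List Char) : List Char :=
  (seg.filter (fun c =>
      PySem.Dict.contains pvDict1 c || PySem.Chars.islower c || PySem.Chars.isdigit c)).map
    (fun c => PySem.Dict.getD pvDict1 c c)

-- the while-loop over segs[1:]: each segment was preceded by a '_' separator
def pvLoopB : List (List Char) → List Char
  | [] => []
  | seg :: rest =>
    match seg with
    | c :: tl => (PySem.Chars.upperChar c :: pvTr tl) ++ pvLoopB rest  -- seg[0].upper() + tr(seg[1:])
    | [] =>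
      match rest with
      | [] => []                                            -- trailing '_': escapes nothing
      | seg2 :: rest2 => ('_' :: pvTr seg2) ++ pvLoopB rest2 -- '__' encoded '_'; next segment is ordinary

def deparsear_alt (s : String) : String :=
  match PySem.Chars.splitOn s.toList ['_'] with
  | [] => ""                                                -- unreachable: split never returns []
  | seg0 :: rest => String.ofList (pvTr seg0 ++ pvLoopB rest)

-- ===== PRECONDITION & SPEC =====
def Spec_deparsear (s : String) (out : String) : Prop := out = deparsear_alt s
instance (s : String) (out : String) : Decidable (Spec_deparsear s out) := by unfold Spec_deparsear; infer_instance

-- ===== CLAIM =====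
def Claim_equal_deparsear : Prop := ∀ (s : String), Dom_deparsear s → Spec_deparsear s (deparsear s)

-- ===== LEMMAS AND PROOFS =====

-- the common specification: what both programs produce, as a lookahead recursion
def pvGoB : List Char → List Char
  | [] => []
  | c :: rest =>
    if c = '_' then
      match rest with
      | [] => []
      | d :: rest' => PySem.Chars.upperChar d :: pvGoB rest'
    else
      match PySem.Dict.get? pvDict1 c with
      | some v => v :: pvGoB rest
      | none =>
        if PySem.Chars.islower c || PySem.Chars.isdigit c then c :: pvGoB rest
        else pvGoB rest

-- what A produces when its flag is False (the char after '_' has been consumed)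
def pvGoBFalse : List Char → List Char
  | [] => []
  | c :: rest => PySem.Chars.upperChar c :: pvGoB rest

theorem pvFold_eq_go (l : List Char) :
    (∀ acc, (l.foldl pvStepA (acc, true)).1 = acc ++ pvGoB l) ∧
    (∀ acc, (l.foldl pvStepA (acc, false)).1 = acc ++ pvGoBFalse l) := by
  induction l with
  | nil => simp [pvGoB, pvGoBFalse]
  | cons c r ih =>
    refine ⟨fun acc => ?_, fun acc => ?_⟩
    · rw [List.foldl_cons]
      by_cases hu : c = '_'
      · subst hu
        have hd : PySem.Dict.get? pvDict1 '_' = none := by decide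
        have hl : (PySem.Chars.islower '_' || PySem.Chars.isdigit '_') = false := by decide
        have h1 : pvStepA (acc, true) '_' = (acc, false) := by
          simp [pvStepA, hd, hl]
        rw [h1, ih.2]
        cases r with
        | nil => rw [pvGoB]; simp [pvGoBFalse]
        | cons d r' => rw [pvGoB]; simp [pvGoBFalse]
      · cases hget : PySem.Dict.get? pvDict1 c with
        | some v =>
          have h1 : pvStepA (acc, true) c = (acc ++ [v], true) := by
            simp [pvStepA, hget]
          rw [h1, ih.1]
          conv_rhs => rw [pvGoB.eq_def]
          simp [hu, hget]
        | none =>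
          by_cases hld : (PySem.Chars.islower c || PySem.Chars.isdigit c) = true
          · have h1 : pvStepA (acc, true) c = (acc ++ [c], true) := by
              simp [pvStepA, hget, hld]
            rw [h1, ih.1]
            conv_rhs => rw [pvGoB.eq_def]
            simp [hu, hget, hld]
          · have hld' : (PySem.Chars.islower c || PySem.Chars.isdigit c) = false := by
              simpa using hld
            have h1 : pvStepA (acc, true) c = (acc, true) := by
              simp [pvStepA, hget, hld', hu]
            rw [h1, ih.1]
            conv_rhs => rw [pvGoB.eq_def]
            simp [hu, hget, hld']
    · rw [List.foldl_cons]
      have h1 : pvStepA (acc, false) c = (acc ++ [PySem.Chars.upperChar c], true) := by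
        simp [pvStepA]
      rw [h1, ih.1, pvGoBFalse]
      simp

-- PySem's split with a one-char separator is Mathlib's List.splitOn (proved through the fuelled go)
theorem pvGo_eq (fuel : Nat) : ∀ (l cur acc : _), l.length ≤ fuel →
    PySem.Chars.splitOn.go ['_'] fuel l cur acc =
      acc.reverse ++ (match l.splitOn '_' with
                      | [] => [cur.reverse]
                      | s0 :: r => (cur.reverse ++ s0) :: r) := by
  induction fuel with
  | zero =>
    intro l cur acc h
    have : l = [] := by cases l <;> simp_all
    subst this
    simp [PySem.Chars.splitOn.go, List.splitOn, List.splitOnP_nil]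
  | succ f ih =>
    intro l cur acc h
    cases l with
    | nil => simp [PySem.Chars.splitOn.go, List.splitOn, List.splitOnP_nil]
    | cons c rest =>
      by_cases hc : c = '_'
      · subst hc
        have hp : (['_'].isPrefixOf ('_' :: rest)) = true := by simp [List.isPrefixOf]
        rw [PySem.Chars.splitOn.go, if_pos hp]
        simp only [List.length, List.drop]
        rw [ih rest [] (cur.reverse :: acc) (by simpa using Nat.le_of_succ_le_succ h)]
        have hsp : ('_' :: rest).splitOn '_' = [] :: rest.splitOn '_' := by
          simp [List.splitOn, List.splitOnP_cons]
        rw [hsp]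
        cases hr : rest.splitOn '_' with
        | nil => exact absurd hr (List.splitOnP_ne_nil _ _)
        | cons s0 r => simp
      · have hp : (['_'].isPrefixOf (c :: rest)) = false := by
          simp only [List.isPrefixOf, Bool.and_true, beq_eq_false_iff_ne, ne_eq]
          exact fun h => hc h.symm
        rw [PySem.Chars.splitOn.go, if_neg (by simp [hp])]
        rw [ih rest (c :: cur) acc (by simpa using Nat.le_of_succ_le_succ h)]
        have hsp : (c :: rest).splitOn '_' = (rest.splitOn '_').modifyHead (c :: ·) := by
          simp [List.splitOn, List.splitOnP_cons, hc]
        rw [hsp]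
        cases hr : rest.splitOn '_' with
        | nil => exact absurd hr (List.splitOnP_ne_nil _ _)
        | cons s0 r => simp

theorem pvSplit_eq (cs : List Char) : PySem.Chars.splitOn cs ['_'] = cs.splitOn '_' := by
  unfold PySem.Chars.splitOn
  rw [pvGo_eq (cs.length + 1) cs [] [] (Nat.le_succ _)]
  cases hr : cs.splitOn '_' with
  | nil => exact absurd hr (List.splitOnP_ne_nil _ _)
  | cons s0 r => simp

-- B's segment processing of the split equals the lookahead spec
theorem pvB_eq (n : Nat) : ∀ cs : List Char, cs.length ≤ n →
    ∀ s0 r, cs.splitOn '_' = s0 :: r → pvTr s0 ++ pvLoopB r = pvGoB cs := by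
  induction n with
  | zero =>
    intro cs h s0 r hsplit
    have : cs = [] := by cases cs <;> simp_all
    subst this
    rw [List.splitOn, List.splitOnP_nil] at hsplit
    obtain ⟨rfl, rfl⟩ := List.cons_eq_cons.mp hsplit
    simp [pvTr, pvLoopB, pvGoB]
  | succ n ih =>
    intro cs h s0 r hsplit
    cases cs with
    | nil =>
      rw [List.splitOn, List.splitOnP_nil] at hsplit
      obtain ⟨rfl, rfl⟩ := List.cons_eq_cons.mp hsplit
      simp [pvTr, pvLoopB, pvGoB]
    | cons c cs' =>
      have hTrNil : pvTr [] = [] := rfl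
      by_cases hc : c = '_'
      · subst hc
        have hsp : ('_' :: cs').splitOn '_' = [] :: cs'.splitOn '_' := by
          simp [List.splitOn, List.splitOnP_cons]
        rw [hsp] at hsplit
        obtain ⟨rfl, rfl⟩ := List.cons_eq_cons.mp hsplit
        rw [hTrNil, List.nil_append]
        cases cs' with
        | nil =>
          have : pvGoB ['_'] = [] := by rw [pvGoB.eq_def]; simp
          rw [this]
          rw [List.splitOn, List.splitOnP_nil]
          rfl
        | cons d r2 =>
          have hgo : pvGoB ('_' :: d :: r2) = PySem.Chars.upperChar d :: pvGoB r2 := by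
            rw [pvGoB.eq_def]; simp
          rw [hgo]
          by_cases hd : d = '_'
          · subst hd
            have hsp2 : ('_' :: r2).splitOn '_' = [] :: r2.splitOn '_' := by
              simp [List.splitOn, List.splitOnP_cons]
            rw [hsp2]
            cases hr : r2.splitOn '_' with
            | nil => exact absurd hr (List.splitOnP_ne_nil _ _)
            | cons s0' r' =>
              have hih := ih r2 (by simp at h; omega) s0' r' hr
              have hlp : pvLoopB ([] :: s0' :: r') = ('_' :: pvTr s0') ++ pvLoopB r' := rfl
              rw [hlp]
              have hup : PySem.Chars.upperChar '_' = '_' := by decide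
              rw [hup]
              simp only [List.cons_append, List.cons.injEq, true_and]
              exact hih
          · have hsp2 : (d :: r2).splitOn '_' = (r2.splitOn '_').modifyHead (d :: ·) := by
              simp [List.splitOn, List.splitOnP_cons, hd]
            rw [hsp2]
            cases hr : r2.splitOn '_' with
            | nil => exact absurd hr (List.splitOnP_ne_nil _ _)
            | cons s0' r' =>
              have hih := ih r2 (by simp at h; omega) s0' r' hr
              simp only [List.modifyHead]
              have hlp : pvLoopB ((d :: s0') :: r') =
                  (PySem.Chars.upperChar d :: pvTr s0') ++ pvLoopB r' := rfl
              rw [hlp]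
              simp only [List.cons_append, List.cons.injEq, true_and]
              exact hih
      · have hsp : (c :: cs').splitOn '_' = (cs'.splitOn '_').modifyHead (c :: ·) := by
          simp [List.splitOn, List.splitOnP_cons, hc]
        rw [hsp] at hsplit
        cases hr : cs'.splitOn '_' with
        | nil => exact absurd hr (List.splitOnP_ne_nil _ _)
        | cons t0 r1 =>
          rw [hr] at hsplit
          simp only [List.modifyHead] at hsplit
          obtain ⟨rfl, rfl⟩ := List.cons_eq_cons.mp hsplit
          have hih := ih cs' (by simp at h; omega) t0 r1 hr
          cases hget : PySem.Dict.get? pvDict1 c with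
          | some v =>
            have hcont : PySem.Dict.contains pvDict1 c = true := by
              cases hb : PySem.Dict.contains pvDict1 c
              · have := (PySem.Dict.get?_eq_none_iff_contains pvDict1 c).2 hb
                rw [hget] at this
                exact absurd this (by simp)
              · rfl
            have hgo : pvGoB (c :: cs') = v :: pvGoB cs' := by
              rw [pvGoB.eq_def]; simp [hc, hget]
            have hTrCons : pvTr (c :: t0) = v :: pvTr t0 := by
              simp [pvTr, hcont, PySem.Dict.getD, hget]
            rw [hgo, hTrCons, List.cons_append, hih]
          | none =>
            have hcont : PySem.Dict.contains pvDict1 c = false :=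
              (PySem.Dict.get?_eq_none_iff_contains pvDict1 c).1 hget
            by_cases hld : (PySem.Chars.islower c || PySem.Chars.isdigit c) = true
            · have hgo : pvGoB (c :: cs') = c :: pvGoB cs' := by
                rw [pvGoB.eq_def]; simp [hc, hget, hld]
              have hTrCons : pvTr (c :: t0) = c :: pvTr t0 := by
                simp [pvTr, hcont, hld, PySem.Dict.getD, hget]
              rw [hgo, hTrCons, List.cons_append, hih]
            · have hld2 : (PySem.Chars.islower c || PySem.Chars.isdigit c) = false := by
                simpa using hld
              have hgo : pvGoB (c :: cs') = pvGoB cs' := by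
                rw [pvGoB.eq_def]; simp [hc, hget, hld2]
              have hTrCons : pvTr (c :: t0) = pvTr t0 := by
                simp [pvTr, hcont, hld2]
              rw [hgo, hTrCons, hih]

-- ===== VERDICT =====
theorem deparsear_spec : Claim_equal_deparsear := by
  intro s _
  unfold Spec_deparsear deparsear deparsear_alt
  rw [(pvFold_eq_go s.toList).1 [], pvSplit_eq]
  cases hr : s.toList.splitOn '_' with
  | nil => exact absurd hr (List.splitOnP_ne_nil _ _)
  | cons s0 r =>
    have hb := pvB_eq s.toList.length s.toList (Nat.le_refl _) s0 r hr
    show String.ofList ([] ++ pvGoB s.toList) = String.ofList (pvTr s0 ++ pvLoopB r)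
    rw [hb, List.nil_append]
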